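-- pv_equiv track=rewrite | github.com/MorinoseiMorizo/sentence_similarity | batch_iterator.py | fill_batch
-- ===== SOURCE A (Python) =====
-- def fill_batch(samples, reverse=True):
--     bos_symbol = 1  # means beginning of the sentence <s>
--     eos_symbol = 2  # 2 is a id of </s>
--     batch_size = len(samples)
--     max_len = max(len(x) for x in samples)
--     batch = [[eos_symbol] * (max_len+2) for _ in range(batch_size)]  # +2 is for <s>, and </s>
--     if reverse:
--         for i, sentence in enumerate(samples):
--             batch[i][max_len+1] = bos_symbol
--             for j, word in enumerate(sentence):
--                 batch[i][max_len-j] = int(word)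
--
--     else:
--         for i, sentence in enumerate(samples):
--             batch[i][0] = bos_symbol
--             for j, word in enumerate(sentence):
--                 batch[i][j+1] = int(word)
--
--     return batch
-- ===== SOURCE B (Python) =====
-- def fill_batch(samples, reverse=True):
--     bos_symbol = 1
--     eos_symbol = 2
--     max_len = max(len(x) for x in samples)
--
--     def token(sentence, j):
--         # closed-form value of cell (row, column j); no matrix, no padding counts
--         if reverse:
--             if j == max_len + 1:
--                 return bos_symbol
--             k = max_len - j
--         else:
--             if j == 0:
--                 return bos_symbol
--             k = j - 1
--         return int(sentence[k]) if k < len(sentence) else eos_symbol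
--
--     return [[token(s, j) for j in range(max_len + 2)] for s in samples]
-- ===== Notes on version B (the rewrite author's own statement) =====
-- stated objective: alternative
-- what changed: Each cell is computed independently by a closed-form column-index formula (token(s, j)) mapped over range(max_len+2), instead of allocating an all-eos matrix and destructively overwriting cells in nested loops; no intermediate matrix, no reversal, no padding-count arithmetic per row.
import Mathlib
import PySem

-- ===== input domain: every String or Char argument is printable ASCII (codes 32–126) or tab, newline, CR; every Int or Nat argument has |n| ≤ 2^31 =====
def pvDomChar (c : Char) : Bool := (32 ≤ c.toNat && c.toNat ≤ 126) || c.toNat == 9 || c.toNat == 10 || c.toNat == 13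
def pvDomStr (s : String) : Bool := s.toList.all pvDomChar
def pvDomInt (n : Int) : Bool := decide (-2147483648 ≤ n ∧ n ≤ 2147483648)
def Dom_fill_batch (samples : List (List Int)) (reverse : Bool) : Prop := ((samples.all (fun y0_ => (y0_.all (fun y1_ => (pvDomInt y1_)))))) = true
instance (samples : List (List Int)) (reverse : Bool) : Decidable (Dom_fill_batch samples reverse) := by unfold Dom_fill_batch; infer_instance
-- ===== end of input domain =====

-- B computes every cell by a closed-form column-index formula mapped over range(max_len+2),
-- instead of A's allocate-all-eos-matrix-then-overwrite-cells; same cost, simpler.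

-- ===== PORT A =====
-- literal port of A: allocate an all-eos matrix, then overwrite cells by index in nested loops
def fill_batch (samples : List (List Int)) (reverse : Bool) : List (List Int) :=
  let bos : Int := 1
  let eos : Int := 2
  let batch_size := samples.length
  match PySem.List.max? (samples.map (fun x => x.length)) (fun y => y) with
  | none => []   -- Python's max() raises ValueError here (samples = []); excluded by Pre_
  | some max_len =>
    let batch := List.replicate batch_size (List.replicate (max_len + 2) eos)
    if reverse then
      (samples.zipIdx).foldl (fun batch si =>
        let row := (batch.getD si.2 []).set (max_len + 1) bos
        let row := (si.1.zipIdx).foldl (fun row wj => row.set (max_len - wj.2) wj.1) row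
        batch.set si.2 row) batch
    else
      (samples.zipIdx).foldl (fun batch si =>
        let row := (batch.getD si.2 []).set 0 bos
        let row := (si.1.zipIdx).foldl (fun row wj => row.set (wj.2 + 1) wj.1) row
        batch.set si.2 row) batch

-- ===== PORT B =====
-- literal port of Source B: each cell is the closed-form `token` of its column index j
def fill_batch_alt (samples : List (List Int)) (reverse : Bool) : List (List Int) :=
  let bos : Int := 1
  let eos : Int := 2
  match PySem.List.max? (samples.map (fun x => x.length)) (fun y => y) with
  | none => []   -- same ValueError from max(); excluded by Pre_
  | some max_len =>
    let token : List Int → Nat → Int := fun sentence j =>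
      if reverse then
        if j == max_len + 1 then bos
        else if max_len - j < sentence.length then sentence.getD (max_len - j) 0 else eos
      else
        if j == 0 then bos
        else if j - 1 < sentence.length then sentence.getD (j - 1) 0 else eos
    samples.map (fun s => (List.range (max_len + 2)).map (fun j => token s j))

-- ===== PRECONDITION & SPEC =====
-- Pre_ excludes only samples = [], where Python's max() (in both A and B) raises ValueError.
def Pre_fill_batch (samples : List (List Int)) (reverse : Bool) : Prop := samples ≠ []
instance (samples : List (List Int)) (reverse : Bool) : Decidable (Pre_fill_batch samples reverse) := by unfold Pre_fill_batch; infer_instance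
def pvWitness_fill_batch : List (List Int) × Bool := ([[3, 4], [5]], true)

def Spec_fill_batch (samples : List (List Int)) (reverse : Bool) (out : List (List Int)) : Prop := out = fill_batch_alt samples reverse
instance (samples : List (List Int)) (reverse : Bool) (out : List (List Int)) : Decidable (Spec_fill_batch samples reverse out) := by unfold Spec_fill_batch; infer_instance

-- ===== CLAIM (what is proved, stated in full; the proofs are below) =====
def Claim_equal_fill_batch : Prop := ∀ (samples : List (List Int)) (reverse : Bool), Dom_fill_batch samples reverse → Pre_fill_batch samples reverse → Spec_fill_batch samples reverse (fill_batch samples reverse)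

-- ===== LEMMAS AND PROOFS =====

theorem pv_getD_append_len {α : Type} (pre : List α) (x : α) (t : List α) (d : α) :
    (pre ++ x :: t).getD pre.length d = x := by
  induction pre with
  | nil => rfl
  | cons a pre ih => simpa [List.getD] using ih

theorem pv_set_append_len {α : Type} (pre : List α) (x y : α) (t : List α) :
    (pre ++ x :: t).set pre.length y = pre ++ y :: t := by
  induction pre with
  | nil => rfl
  | cons a pre ih => simp [ih]

theorem pv_set_replicate_append {α : Type} (c : α) (n : Nat) (y : α) (suf : List α) :
    (List.replicate (n + 1) c ++ suf).set n y = List.replicate n c ++ y :: suf := by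
  induction n with
  | zero => simp
  | succ n ih =>
    rw [List.replicate_succ (n := n + 1), List.cons_append, List.set_cons_succ, ih,
      List.replicate_succ, List.cons_append]

-- A's outer loop writes row i once, into an all-identical fresh matrix
theorem pv_outer {α : Type} (g : List Int → List α → List α) (R : List α) :
    ∀ (l : List (List Int)) (pre : List (List α)),
      (l.zipIdx pre.length).foldl
          (fun batch si => batch.set si.2 (g si.1 (batch.getD si.2 [])))
          (pre ++ List.replicate l.length R)
        = pre ++ l.map (fun s => g s R) := by
  intro l
  induction l with
  | nil => intro pre; simp
  | cons s l ih =>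
    intro pre
    simp only [List.zipIdx_cons, List.foldl_cons, List.length_cons, List.replicate_succ]
    rw [pv_getD_append_len, pv_set_append_len]
    have h := ih (pre ++ [g s R])
    simp only [List.length_append, List.length_cons, List.length_nil, List.append_assoc,
      List.cons_append, List.nil_append] at h ⊢
    rw [h]
    simp

-- A's reverse-direction inner loop fills the eos prefix from its right end
theorem pv_innerR (m : Nat) :
    ∀ (s : List Int) (k : Nat) (suf : List Int), k + s.length ≤ m + 1 →
      (s.zipIdx k).foldl (fun row wj => row.set (m - wj.2) wj.1)
          (List.replicate (m + 1 - k) 2 ++ suf)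
        = List.replicate (m + 1 - k - s.length) 2 ++ s.reverse ++ suf := by
  intro s
  induction s with
  | nil => intro k suf _; simp
  | cons w s ih =>
    intro k suf hk
    simp only [List.length_cons] at hk
    have h1 : m + 1 - k = (m - k) + 1 := by omega
    simp only [List.zipIdx_cons, List.foldl_cons, h1]
    rw [pv_set_replicate_append]
    have h2 := ih (k + 1) (w :: suf) (by omega)
    have h3 : m + 1 - (k + 1) = m - k := by omega
    rw [h3] at h2
    rw [h2]
    simp only [List.length_cons, List.reverse_cons]
    have h4 : (m - k) + 1 - (s.length + 1) = m - k - s.length := by omega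
    rw [h4]
    simp [List.append_assoc]

-- A's forward-direction inner loop fills cells left to right after the bos prefix
theorem pv_innerF (m : Nat) :
    ∀ (s : List Int) (k : Nat) (pre : List Int), pre.length = k + 1 → k + 1 + s.length ≤ m + 2 →
      (s.zipIdx k).foldl (fun row wj => row.set (wj.2 + 1) wj.1)
          (pre ++ List.replicate (m + 1 - k) 2)
        = pre ++ s ++ List.replicate (m + 1 - k - s.length) 2 := by
  intro s
  induction s with
  | nil => intro k pre _ _; simp
  | cons w s ih =>
    intro k pre hpre hk
    simp only [List.length_cons] at hk
    have h1 : m + 1 - k = (m - k) + 1 := by omega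
    simp only [List.zipIdx_cons, List.foldl_cons, h1, List.replicate_succ]
    rw [← hpre, pv_set_append_len, hpre]
    have h2 := ih (k + 1) (pre ++ [w]) (by simp [hpre]) (by omega)
    have h3 : m + 1 - (k + 1) = m - k := by omega
    rw [h3] at h2
    rw [show pre ++ w :: List.replicate (m - k) (2 : Int) = (pre ++ [w]) ++ List.replicate (m - k) 2 by simp,
      h2]
    simp only [List.length_cons]
    have h4 : (m - k) + 1 - (s.length + 1) = m - k - s.length := by omega
    rw [h4]
    simp [List.append_assoc]

-- B's reverse-direction per-cell formula yields the padded reversed row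
theorem pvB_rev (m : Nat) (s : List Int) (h : s.length ≤ m) :
    (List.range (m + 2)).map (fun j =>
        if j == m + 1 then (1 : Int)
        else if m - j < s.length then s.getD (m - j) 0 else 2)
      = List.replicate (m - s.length + 1) 2 ++ s.reverse ++ [1] := by
  apply List.ext_getElem
  · simp; omega
  · intro i h1 h2
    simp only [List.getElem_map, List.getElem_range]
    simp only [List.length_map, List.length_range] at h1
    by_cases hi1 : i = m + 1
    · subst hi1
      have hl : (List.replicate (m - s.length + 1) (2 : Int) ++ s.reverse).length = m + 1 := by
        simp; omega
      rw [List.getElem_append_right (by omega)]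
      simp [hl]
    · have hi : i < m + 1 := by omega
      by_cases hc : m - i < s.length
      · -- word cell: RHS is in the s.reverse segment
        have hp : (List.replicate (m - s.length + 1) (2 : Int)).length ≤ i := by simp; omega
        rw [List.getElem_append_left (by simp; omega), List.getElem_append_right hp]
        simp only [List.length_replicate, List.getElem_reverse]
        simp only [beq_iff_eq, if_neg hi1, if_pos hc]
        rw [List.getD_eq_getElem _ _ hc]
        congr 1
        omega
      · -- padding cell
        rw [List.getElem_append_left (by simp; omega), List.getElem_append_left (by simp; omega)]
        simp [hi1, hc]

-- B's forward-direction per-cell formula yields the bos-then-words-then-padding row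
theorem pvB_fwd (m : Nat) (s : List Int) (h : s.length ≤ m) :
    (List.range (m + 2)).map (fun j =>
        if j == 0 then (1 : Int)
        else if j - 1 < s.length then s.getD (j - 1) 0 else 2)
      = [1] ++ s ++ List.replicate (m + 1 - s.length) 2 := by
  apply List.ext_getElem
  · simp; omega
  · intro i h1 h2
    simp only [List.getElem_map, List.getElem_range]
    simp only [List.length_map, List.length_range] at h1
    by_cases hi0 : i = 0
    · subst hi0; rfl
    · by_cases hc : i - 1 < s.length
      · rw [List.getElem_append_left (show i < ([(1:Int)] ++ s).length by simp; omega),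
          List.getElem_append_right (show ([(1:Int)]).length ≤ i by simp; omega)]
        simp [hi0, hc]
      · rw [List.getElem_append_right (show ([(1:Int)] ++ s).length ≤ i by simp; omega)]
        simp [hi0, hc]

-- ===== VERDICT (by name: the statement is the Claim_ definition above) =====
theorem fill_batch_spec : Claim_equal_fill_batch := by
  intro samples reverse _ hpre
  unfold Spec_fill_batch fill_batch fill_batch_alt
  cases hmax : PySem.List.max? (samples.map (fun x => x.length)) (fun y => y) with
  | none => exact absurd (List.map_eq_nil_iff.1 ((PySem.List.max?_eq_none_iff _ _).1 hmax)) hpre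
  | some m =>
    have hle : ∀ s ∈ samples, s.length ≤ m := by
      intro s hs
      exact PySem.List.max?_isMax hmax _ (List.mem_map_of_mem hs)
    cases reverse with
    | true =>
      simp only [if_pos]
      have houter := pv_outer
        (fun s row => ((s.zipIdx).foldl (fun row wj => row.set (m - wj.2) wj.1) (row.set (m + 1) (1 : Int))))
        (List.replicate (m + 2) (2 : Int)) samples []
      simp only [List.nil_append, List.length_nil] at houter
      rw [houter]
      apply List.map_congr_left
      intro s hs
      have hs' := hle s hs
      have hrow : (List.replicate (m + 2) (2 : Int)).set (m + 1) 1
          = List.replicate (m + 1) (2 : Int) ++ [1] := by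
        rw [show List.replicate (m + 2) (2 : Int) = List.replicate ((m + 1) + 1) 2 ++ [] by simp,
          pv_set_replicate_append]
      have hinner := pv_innerR m s 0 [1] (by omega)
      simp only [Nat.sub_zero] at hinner
      rw [hrow, hinner, pvB_rev m s hs']
      have h : m + 1 - s.length = m - s.length + 1 := by omega
      rw [h]
    | false =>
      simp only [Bool.false_eq_true, ite_false]
      have houter := pv_outer
        (fun s row => ((s.zipIdx).foldl (fun row wj => row.set (wj.2 + 1) wj.1) (row.set 0 (1 : Int))))
        (List.replicate (m + 2) (2 : Int)) samples []
      simp only [List.nil_append, List.length_nil] at houter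
      rw [houter]
      apply List.map_congr_left
      intro s hs
      have hs' := hle s hs
      have hrow : (List.replicate (m + 2) (2 : Int)).set 0 1
          = [(1 : Int)] ++ List.replicate (m + 1) (2 : Int) := by
        simp [List.replicate_succ]
      have hinner := pvB_fwd m s hs'
      rw [hrow]
      have hF := pv_innerF m s 0 [1] (by simp) (by omega)
      simp only [Nat.sub_zero] at hF
      rw [hF, hinner]
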